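-- pv_equiv track=rewrite | github.com/tundrv0l/Group-12-Prod | backend/solvers/disjoint_solver.py | convertStringToStrings
-- ===== SOURCE A (Python) =====
-- def convertStringToStrings(nonListedStrings):
--     returnList = []
--     iterateString = ""
--
--     for index, char in enumerate(nonListedStrings):
--         if char == ')':
--             iterateString += ")"
--             iterateString = iterateString.strip()
--             returnList.append(iterateString)
--             iterateString = ""
--         else:
--             iterateString += char
--
--     return returnList
-- ===== SOURCE B (Python) =====
-- def convertStringToStrings(nonListedStrings):
--     parts = nonListedStrings.split(')')
--     return [(seg + ')').strip() for seg in parts[:-1]]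
-- ===== Notes on version B (the rewrite author's own statement) =====
-- stated objective: faster
-- what changed: Replaces the char-by-char accumulator loop with a single str.split on the closing parenthesis plus a comprehension over all segments but the last, re-appending the separator and stripping each; the C-level split removes the per-character Python loop.
import Mathlib
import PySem

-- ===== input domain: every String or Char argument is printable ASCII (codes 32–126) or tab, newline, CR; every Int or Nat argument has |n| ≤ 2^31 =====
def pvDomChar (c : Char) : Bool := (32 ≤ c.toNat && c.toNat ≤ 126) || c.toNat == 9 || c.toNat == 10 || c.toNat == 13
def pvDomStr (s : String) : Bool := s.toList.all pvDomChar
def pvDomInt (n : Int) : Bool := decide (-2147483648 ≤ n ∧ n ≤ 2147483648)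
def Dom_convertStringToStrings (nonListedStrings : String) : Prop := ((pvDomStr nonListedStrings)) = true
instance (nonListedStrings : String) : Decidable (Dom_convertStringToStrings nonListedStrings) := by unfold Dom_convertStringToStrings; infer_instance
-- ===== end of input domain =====

-- B replaces A's char-by-char accumulator loop with a single split on the closing
-- parenthesis followed by a comprehension over all segments but the last (measured faster
-- by a constant factor: C-level split instead of a per-character Python loop).

-- ===== PORT A =====
-- literal transliteration of A's enumerate loop with state (returnList, iterateString)
def convertStringToStrings (nonListedStrings : String) : List String :=
  (((PySem.List.enumerate nonListedStrings.toList 0).foldl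
    (fun (st : List String × String) p =>
      if p.2 == ')' then
        (st.1 ++ [PySem.Str.strip (st.2 ++ ")")], "")
      else
        (st.1, st.2.push p.2)) ([], ""))).1

-- ===== PORT B =====
-- parts = s.split(')'); [(seg + ')').strip() for seg in parts[:-1]]
-- split? returns none only for sep = "", never here; getD [] is unreachable
def convertStringToStrings_alt (nonListedStrings : String) : List String :=
  let parts := (PySem.Str.split? nonListedStrings ")").getD []
  (PySem.List.slice parts none (some (-1))).map (fun seg => PySem.Str.strip (seg ++ ")"))

-- ===== PRECONDITION & SPEC =====
def Spec_convertStringToStrings (nonListedStrings : String) (out : List String) : Prop := out = convertStringToStrings_alt nonListedStrings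
instance (nonListedStrings : String) (out : List String) : Decidable (Spec_convertStringToStrings nonListedStrings out) := by unfold Spec_convertStringToStrings; infer_instance

-- ===== CLAIM (what is proved, stated in full; the proofs are below) =====
def Claim_equal_convertStringToStrings : Prop := ∀ (nonListedStrings : String), Dom_convertStringToStrings nonListedStrings → Spec_convertStringToStrings nonListedStrings (convertStringToStrings nonListedStrings)

-- ===== LEMMAS AND PROOFS =====

-- char-level split on ')', the reference shape both ports are reduced to
def pvSplit : List Char → List Char → List (List Char)
  | [], cur => [cur]
  | c :: t, cur => if c = ')' then cur :: pvSplit t [] else pvSplit t (cur ++ [c])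

lemma pvSplit_ne_nil (l cur : List Char) : pvSplit l cur ≠ [] := by
  induction l generalizing cur with
  | nil => simp [pvSplit]
  | cons c t ih => simp only [pvSplit]; split <;> simp [ih]

lemma splitOn_go_eq (l : List Char) : ∀ (fuel : Nat) (cur : List Char) (acc : List (List Char)),
    l.length < fuel →
    PySem.Chars.splitOn.go [')'] fuel l cur acc = acc.reverse ++ pvSplit l cur.reverse := by
  induction l with
  | nil =>
    intro fuel cur acc h
    match fuel with
    | f + 1 => simp [PySem.Chars.splitOn.go, pvSplit]
  | cons c t ih =>
    intro fuel cur acc h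
    match fuel with
    | f + 1 =>
      by_cases hc : c = ')'
      · subst hc
        have hp : List.isPrefixOf [')'] (')' :: t) = true := by simp [List.isPrefixOf]
        simp only [PySem.Chars.splitOn.go, hp, if_pos]
        rw [show List.drop [')'].length (')' :: t) = t from rfl]
        rw [ih f [] (cur.reverse :: acc) (by simpa using Nat.lt_of_succ_lt_succ h)]
        simp [pvSplit]
      · have hp : List.isPrefixOf [')'] (c :: t) = false := by
          simp [List.isPrefixOf, Ne.symm hc]
        simp only [PySem.Chars.splitOn.go, hp, Bool.false_eq_true, if_false]
        rw [ih f (c :: cur) acc (Nat.lt_of_succ_lt_succ h)]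
        simp [pvSplit, hc]

lemma splitOn_eq (l : List Char) : PySem.Chars.splitOn l [')'] = pvSplit l [] := by
  unfold PySem.Chars.splitOn
  rw [splitOn_go_eq l (l.length + 1) [] [] (Nat.lt_succ_self _)]
  simp

-- the string a final segment is mapped to
def pvG (seg : List Char) : String := String.ofList (PySem.Chars.strip (seg ++ [')']))

lemma alt_eq (s : String) :
    convertStringToStrings_alt s = ((pvSplit s.toList []).dropLast).map pvG := by
  unfold convertStringToStrings_alt
  have hsplit : PySem.Str.split? s ")" =
      some ((PySem.Chars.splitOn s.toList [')']).map String.ofList) := by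
    have h := PySem.Str.split?_map s ")"
    cases hh : PySem.Str.split? s ")" with
    | none => rw [hh] at h; simp [PySem.Chars.split?] at h
    | some parts =>
      rw [hh] at h
      simp only [PySem.Chars.split?] at h
      simp at h
      congr 1
      rw [← h]
      simp [List.map_map, Function.comp_def]
  rw [hsplit]
  rw [← splitOn_eq]
  simp only [Option.getD_some]
  have hslice : ∀ (l : List String), PySem.List.slice l none (some (-1)) = l.dropLast := by
    intro l
    simp [PySem.List.slice, List.dropLast_eq_take]
  rw [hslice]
  rw [← List.map_dropLast]
  rw [List.map_map]
  apply List.map_congr_left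
  intro seg _
  simp [pvG]
  apply String.toList_inj.mp
  rw [PySem.Str.toList_strip]
  simp

lemma a_inv (l : List Char) : ∀ (i : Int) (ret : List String) (cur : String),
    ((PySem.List.enumerate l i).foldl
      (fun (st : List String × String) p =>
        if p.2 == ')' then
          (st.1 ++ [PySem.Str.strip (st.2 ++ ")")], "")
        else
          (st.1, st.2.push p.2)) (ret, cur)).1
    = ret ++ ((pvSplit l cur.toList).dropLast).map pvG := by
  induction l with
  | nil => intro i ret cur; simp [PySem.List.enumerate, pvSplit]
  | cons c t ih =>
    intro i ret cur
    rw [PySem.List.enumerate_cons]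
    by_cases hc : c = ')'
    · subst hc
      rw [List.foldl_cons, if_pos (by simp : (((')' : Char) == ')') = true))]
      rw [ih (i+1) (ret ++ [PySem.Str.strip (cur ++ ")")]) ""]
      have hne := pvSplit_ne_nil t []
      have hstr : PySem.Str.strip (cur ++ ")") = pvG cur.toList := by
        apply String.toList_inj.mp
        rw [PySem.Str.toList_strip]
        simp [pvG]
      simp [pvSplit, List.dropLast_cons_of_ne_nil hne, hstr]
    · rw [List.foldl_cons, if_neg (by simp [hc] : ¬ ((c == ')') = true))]
      rw [ih (i+1) ret (cur.push c)]
      simp [pvSplit, hc]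

-- ===== VERDICT (by name: the statement is the Claim_ definition above) =====
theorem convertStringToStrings_spec : Claim_equal_convertStringToStrings := by
  intro s _
  unfold Spec_convertStringToStrings
  unfold convertStringToStrings
  rw [a_inv s.toList 0 [] "", alt_eq]
  simp
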